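-- pv_equiv track=rewrite | github.com/kevinjzheng/Data-Structures | Homework/Homework4/kjz233_hw4_q5.py | is_number_of_lowercase_even
-- ===== SOURCE A (Python) =====
-- def is_number_of_lowercase_even(s,low,high):
--     if low == high:
--         if s[low].islower():
--             return False
--         return True
--     else:
--         rest = is_number_of_lowercase_even(s,low+1,high)
--         if s[low].islower():
--             return not rest
--         return rest
-- ===== SOURCE B (Python) =====
-- def is_number_of_lowercase_even(s, low, high):
--     parity = False
--     i = high
--     while True:
--         parity ^= s[i].islower()
--         if i == low:
--             break
--         i -= 1
--     return not parity
-- ===== Notes on version B (the rewrite author's own statement) =====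
-- stated objective: alternative
-- what changed: Replaces the ascending boolean-flipping recursion by an iterative loop that scans the range backwards from high down to low, XOR-ing a parity flag, and negates it once at the end.
import Mathlib
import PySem

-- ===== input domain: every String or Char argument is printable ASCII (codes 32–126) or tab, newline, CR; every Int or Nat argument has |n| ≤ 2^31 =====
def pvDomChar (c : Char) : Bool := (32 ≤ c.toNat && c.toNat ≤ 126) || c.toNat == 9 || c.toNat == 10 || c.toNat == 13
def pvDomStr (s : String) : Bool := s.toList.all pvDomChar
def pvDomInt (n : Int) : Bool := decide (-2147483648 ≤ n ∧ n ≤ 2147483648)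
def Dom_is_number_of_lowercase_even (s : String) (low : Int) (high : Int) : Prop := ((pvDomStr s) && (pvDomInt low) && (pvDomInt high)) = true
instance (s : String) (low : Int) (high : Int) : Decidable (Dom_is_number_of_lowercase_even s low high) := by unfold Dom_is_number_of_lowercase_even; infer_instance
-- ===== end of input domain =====

-- B replaces A's ascending boolean-flipping recursion by an iterative backward scan (high down to low) XOR-ing a parity flag, negated once at the end (alternative decomposition, same cost).


-- ===== PORT A =====
-- Literal port of A's recursion; fuel (high - low).toNat bounds the recursion depth
-- (inside Pre_ it is exactly A's depth; the 'none'/fuel-0 branches are unreachable there).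
def pvGoA (s : String) (high : Int) : Int → Nat → Bool
  | low, fuel =>
    if low = high then
      match PySem.Str.pyGet? s low with
      | some c => !(PySem.Chars.islower c)
      | none => false
    else
      match fuel with
      | 0 => false
      | f + 1 =>
        let rest := pvGoA s high (low + 1) f
        match PySem.Str.pyGet? s low with
        | some c => if PySem.Chars.islower c then !rest else rest
        | none => false

def is_number_of_lowercase_even (s : String) (low : Int) (high : Int) : Bool :=
  pvGoA s high low (high - low).toNat

-- ===== PORT B =====
-- Literal port of B's backward while-loop; `parity` is the running XOR of s[i].islower(),
-- fuel (i - low).toNat bounds the remaining iterations (exact inside Pre_; the 'none'/fuel-0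
-- branches are unreachable there).
def pvLoopB (s : String) (low : Int) : Int → Bool → Nat → Bool
  | i, parity, fuel =>
    match PySem.Str.pyGet? s i with
    | none => false
    | some c =>
      let parity' := xor parity (PySem.Chars.islower c)
      if i = low then !parity'
      else
        match fuel with
        | 0 => false
        | f + 1 => pvLoopB s low (i - 1) parity' f

def is_number_of_lowercase_even_alt (s : String) (low : Int) (high : Int) : Bool :=
  pvLoopB s low high false (high - low).toNat

-- ===== PRECONDITION & SPEC =====
-- Exactly the inputs on which A returns: a non-reversed range whose every index is a valid
-- (possibly negative) Python index of s; on all other inputs A's recursion hits an IndexError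
-- (and B's loop does too).
def Pre_is_number_of_lowercase_even (s : String) (low : Int) (high : Int) : Prop :=
  -(s.toList.length : Int) ≤ low ∧ low ≤ high ∧ high < (s.toList.length : Int)
instance (s : String) (low : Int) (high : Int) : Decidable (Pre_is_number_of_lowercase_even s low high) := by
  unfold Pre_is_number_of_lowercase_even; infer_instance

def pvWitness_is_number_of_lowercase_even : String × Int × Int := ("aBc", 0, 2)

def Spec_is_number_of_lowercase_even (s : String) (low : Int) (high : Int) (out : Bool) : Prop := out = is_number_of_lowercase_even_alt s low high
instance (s : String) (low : Int) (high : Int) (out : Bool) : Decidable (Spec_is_number_of_lowercase_even s low high out) := by unfold Spec_is_number_of_lowercase_even; infer_instance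

-- ===== CLAIM (what is proved, stated in full; the proofs are below) =====
def Claim_equal_is_number_of_lowercase_even : Prop := ∀ (s : String) (low : Int) (high : Int), Dom_is_number_of_lowercase_even s low high → Pre_is_number_of_lowercase_even s low high → Spec_is_number_of_lowercase_even s low high (is_number_of_lowercase_even s low high)

-- ===== LEMMAS AND PROOFS =====

-- indexing succeeds on every index the precondition admits
theorem pvGet_some (s : String) (i : Int)
    (h1 : -(s.toList.length : Int) ≤ i) (h2 : i < (s.toList.length : Int)) :
    ∃ c, PySem.Str.pyGet? s i = some c := by
  have hne : PySem.Str.pyGet? s i ≠ none := by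
    intro h
    have hni : ¬ PySem.Raise.InRange s.toList.length i := by
      rw [← PySem.List.pyGet?_eq_none_iff]; simpa using h
    have hlen : s.toList.length = s.length := by simp
    exact hni (by simp [PySem.Raise.InRange]; omega)
  exact Option.ne_none_iff_exists'.mp hne

-- the common specification both ports compute: XOR of the lowercase indicators over [low, high]
def pvPar (s : String) (low high : Int) : Bool :=
  ((PySem.List.pyRange low (high + 1) 1).map
    (fun i => match PySem.Str.pyGet? s i with
              | some c => PySem.Chars.islower c
              | none => false)).foldl xor false

theorem pvXor_foldl (l : List Bool) : ∀ a : Bool, l.foldl xor a = xor a (l.foldl xor false) := by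
  induction l with
  | nil => intro a; simp
  | cons x t ih =>
    intro a
    simp only [List.foldl]
    rw [ih (xor a x), ih (xor false x)]
    cases a <;> cases x <;> simp

-- A's ascending recursion computes the negated parity of the whole range
theorem pvGoA_eq_par (s : String) (high : Int)
    (hh : high < (s.toList.length : Int)) :
    ∀ (f : Nat) (low : Int),
      -(s.toList.length : Int) ≤ low → low ≤ high → high - low ≤ (f : Int) →
      pvGoA s high low f = !(pvPar s low high) := by
  intro f
  induction f with
  | zero =>
    intro low h1 h2 hf
    have hlh : low = high := by omega
    subst hlh
    obtain ⟨c, hc⟩ := pvGet_some s low h1 (by omega)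
    have hc' : PySem.List.pyGet? s.toList low = some c := hc
    rw [pvPar, PySem.List.pyRange_one_cons (by omega), PySem.List.pyRange_one_eq_nil (by omega)]
    rw [pvGoA]; simp [hc']
  | succ f ih =>
    intro low h1 h2 hf
    by_cases hlh : low = high
    · subst hlh
      obtain ⟨c, hc⟩ := pvGet_some s low h1 (by omega)
      have hc' : PySem.List.pyGet? s.toList low = some c := hc
      rw [pvPar, PySem.List.pyRange_one_cons (by omega), PySem.List.pyRange_one_eq_nil (by omega)]
      rw [pvGoA]; simp [hc']
    · obtain ⟨c, hc⟩ := pvGet_some s low h1 (by omega)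
      have hc' : PySem.List.pyGet? s.toList low = some c := hc
      have hrec := ih (low + 1) (by omega) (by omega) (by omega)
      rw [pvPar, PySem.List.pyRange_one_cons (by omega)]
      rw [pvGoA]
      simp only [if_neg hlh, hc, hc', List.map, List.foldl, hrec]
      rw [pvXor_foldl]
      rw [show ((PySem.List.pyRange (low + 1) (high + 1) 1).map
        (fun i => match PySem.Str.pyGet? s i with
                  | some c => PySem.Chars.islower c
                  | none => false)).foldl xor false = pvPar s (low + 1) high from rfl]
      cases hl : PySem.Chars.islower c <;> cases pvPar s (low + 1) high <;> simp [hl]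

-- B's descending loop folds the same parity in from the other end
theorem pvLoopB_eq_par (s : String) (low : Int)
    (hl : -(s.toList.length : Int) ≤ low) :
    ∀ (f : Nat) (i : Int) (parity : Bool),
      low ≤ i → i < (s.toList.length : Int) → i - low ≤ (f : Int) →
      pvLoopB s low i parity f = !(xor parity (pvPar s low i)) := by
  intro f
  induction f with
  | zero =>
    intro i parity h2 h3 hf
    have hil : i = low := by omega
    subst hil
    obtain ⟨c, hc⟩ := pvGet_some s i hl h3
    have hc' : PySem.List.pyGet? s.toList i = some c := hc
    rw [pvPar, PySem.List.pyRange_one_cons (by omega), PySem.List.pyRange_one_eq_nil (by omega)]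
    rw [pvLoopB]; simp [hc']
  | succ f ih =>
    intro i parity h2 h3 hf
    by_cases hil : i = low
    · subst hil
      obtain ⟨c, hc⟩ := pvGet_some s i hl h3
      have hc' : PySem.List.pyGet? s.toList i = some c := hc
      rw [pvPar, PySem.List.pyRange_one_cons (by omega), PySem.List.pyRange_one_eq_nil (by omega)]
      rw [pvLoopB]; simp [hc']
    · obtain ⟨c, hc⟩ := pvGet_some s i (by omega) h3
      have hc' : PySem.List.pyGet? s.toList i = some c := hc
      have hrec := ih (i - 1) (xor parity (PySem.Chars.islower c)) (by omega) (by omega) (by omega)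
      have hsplit : pvPar s low i = xor (pvPar s low (i - 1)) (PySem.Chars.islower c) := by
        rw [pvPar, pvPar, show i + 1 = (i - 1 + 1) + 1 by ring,
          PySem.List.pyRange_one_succ_right (by omega), List.map_append, List.foldl_append,
          show i - 1 + 1 = i from by ring]
        simp [hc']
      rw [pvLoopB]
      simp only [hc, hc', if_neg hil, hrec, hsplit]
      cases parity <;> cases PySem.Chars.islower c <;> cases pvPar s low (i - 1) <;> simp

-- ===== VERDICT (by name: the statement is the Claim_ definition above) =====
theorem is_number_of_lowercase_even_spec : Claim_equal_is_number_of_lowercase_even := by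
  intro s low high _ hpre
  obtain ⟨h1, h2, h3⟩ := hpre
  unfold Spec_is_number_of_lowercase_even is_number_of_lowercase_even is_number_of_lowercase_even_alt
  rw [pvGoA_eq_par s high h3 _ low h1 h2 (by omega),
      pvLoopB_eq_par s low h1 _ high false h2 h3 (by omega)]
  simp
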